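-- pv_equiv track=rewrite | github.com/hutchison/chess | chess_stuff.py | pgn_variation
-- ===== SOURCE A (Python) =====
-- def pgn_variation(variation, turn):
--     n = 1
--     if turn:
--         s = ''
--         start = 0
--     else:
--         s = '1...'
--         start = 1
--
--     for h, move in enumerate(variation, start):
--         if h % 2 == 0:
--             s += f' {n}. {move}'
--         else:
--             s += f' {move}'
--             n += 1
--
--     return s.strip()
-- ===== SOURCE B (Python) =====
-- def pgn_variation(variation, turn):
--     tokens = []
--     rest = variation
--     k = 1
--     if not turn:
--         tokens.append('1...')
--         if rest:
--             tokens.append(rest[0])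
--             rest = rest[1:]
--         k = 2
--     i = 0
--     while i < len(rest):
--         tokens.append(f'{k}. {rest[i]}')
--         if i + 1 < len(rest):
--             tokens.append(rest[i + 1])
--         k += 1
--         i += 2
--     return ' '.join(tokens).strip()
-- ===== Notes on version B (the rewrite author's own statement) =====
-- stated objective: alternative
-- what changed: B iterates over full moves two half-moves at a time with an explicit move counter, collecting tokens into a list that is joined once, instead of A's enumerate-over-half-moves fold with parity tests and incremental string concatenation.
import Mathlib
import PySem

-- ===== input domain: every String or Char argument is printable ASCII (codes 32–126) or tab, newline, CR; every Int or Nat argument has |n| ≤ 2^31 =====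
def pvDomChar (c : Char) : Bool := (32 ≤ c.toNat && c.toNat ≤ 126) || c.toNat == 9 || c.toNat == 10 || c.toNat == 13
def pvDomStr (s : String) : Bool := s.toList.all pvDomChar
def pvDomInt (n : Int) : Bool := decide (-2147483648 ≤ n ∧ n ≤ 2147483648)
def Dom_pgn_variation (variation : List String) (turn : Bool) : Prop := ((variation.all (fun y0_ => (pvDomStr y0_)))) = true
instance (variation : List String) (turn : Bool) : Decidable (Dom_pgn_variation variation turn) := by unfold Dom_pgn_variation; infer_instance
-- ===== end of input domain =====

-- B formats by full moves (two half-moves per step, tokens joined once) instead of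
-- A's half-move enumerate fold with parity tests; objective: alternative decomposition.

-- ===== PORT A =====
-- loop body of A: state (n, s); step on (h, move)
def pgnA_step (st : Int × List Char) (p : Int × String) : Int × List Char :=
  if PySem.Int.mod p.1 2 == 0 then
    (st.1, st.2 ++ ' ' :: (PySem.Int.toChars st.1 ++ '.' :: ' ' :: p.2.toList))
  else
    (st.1 + 1, st.2 ++ ' ' :: p.2.toList)

def pgn_variation (variation : List String) (turn : Bool) : String :=
  let init : List Char × Int := if turn then ([], 0) else (['1', '.', '.', '.'], 1)
  let r := (PySem.List.enumerate variation init.2).foldl pgnA_step (1, init.1)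
  String.ofList (PySem.Chars.strip r.2)

-- ===== PORT B =====
-- token f'{k}. {w}'
def pgnB_tok (k : Int) (w : String) : List Char :=
  PySem.Int.toChars k ++ '.' :: ' ' :: w.toList

-- Source B's while loop: two half-moves at a time
def pgnB_loop : Int → List String → List (List Char)
  | _, [] => []
  | k, [w] => [pgnB_tok k w]
  | k, w :: b :: t => pgnB_tok k w :: b.toList :: pgnB_loop (k + 1) t

def pgn_variation_alt (variation : List String) (turn : Bool) : String :=
  let p : List (List Char) × List String × Int :=
    if turn then ([], variation, 1)
    else
      match variation with
      | [] => ([['1', '.', '.', '.']], [], 2)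
      | m :: t => ([['1', '.', '.', '.'], m.toList], t, 2)
  String.ofList (PySem.Chars.strip (PySem.Chars.join [' '] (p.1 ++ pgnB_loop p.2.2 p.2.1)))

-- ===== PRECONDITION & SPEC =====
def Spec_pgn_variation (variation : List String) (turn : Bool) (out : String) : Prop := out = pgn_variation_alt variation turn
instance (variation : List String) (turn : Bool) (out : String) : Decidable (Spec_pgn_variation variation turn out) := by unfold Spec_pgn_variation; infer_instance

-- ===== CLAIM (what is proved, stated in full; the proofs are below) =====
def Claim_equal_pgn_variation : Prop := ∀ (variation : List String) (turn : Bool), Dom_pgn_variation variation turn → Spec_pgn_variation variation turn (pgn_variation variation turn)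

-- ===== LEMMAS AND PROOFS =====

lemma pgn_mod_two_even (k : Int) : PySem.Int.mod (2 * k) 2 = 0 :=
  (PySem.Int.mod_eq_zero_iff_dvd _ _).mpr ⟨k, rfl⟩

lemma pgn_foldA_join : (l : List String) → (k : Int) → (s : List Char) →
    ((PySem.List.enumerate l (2 * (k - 1))).foldl pgnA_step (k, s)).2
      = s ++ (pgnB_loop k l).flatMap (fun t => ' ' :: t)
  | [], k, s => by
    simp [PySem.List.enumerate_nil, pgnB_loop]
  | [w], k, s => by
    simp [PySem.List.enumerate_cons, PySem.List.enumerate_nil, pgnB_loop,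
      pgnA_step, pgnB_tok]
  | w :: b :: t, k, s => by
    have h1 := pgn_mod_two_even (k - 1)
    have ih := pgn_foldA_join t (k + 1) (s ++ ' ' :: pgnB_tok k w ++ ' ' :: b.toList)
    simp only [PySem.List.enumerate_cons, List.foldl_cons, pgnA_step, h1,
      beq_self_eq_true, if_pos] at *
    have hod : (PySem.Int.mod (2 * (k - 1) + 1) 2 == 0) = false := by
      simp
    have hstart : 2 * (k - 1) + 1 + 1 = 2 * (k + 1 - 1) := by ring
    simp only [hod, Bool.false_eq_true, if_false, hstart] at *
    rw [show s ++ ' ' :: (PySem.Int.toChars k ++ '.' :: ' ' :: w.toList) ++ ' ' :: b.toList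
        = s ++ ' ' :: pgnB_tok k w ++ ' ' :: b.toList from by simp [pgnB_tok], ih]
    simp [pgnB_loop]

lemma pgn_join_space_cons (a : List Char) (ts : List (List Char)) :
    PySem.Chars.join [' '] (a :: ts) = a ++ ts.flatMap (fun t => ' ' :: t) := by
  induction ts generalizing a with
  | nil => simp [PySem.Chars.join_singleton]
  | cons b ts ih =>
    rw [PySem.Chars.join_cons_cons, ih b]
    simp

lemma pgn_strip_space_cons (x : List Char) :
    PySem.Chars.strip (' ' :: x) = PySem.Chars.strip x := by
  simp [PySem.Chars.strip, PySem.Chars.lstrip, PySem.Chars.isspace]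

-- ===== VERDICT (by name: the statement is the Claim_ definition above) =====
theorem pgn_variation_spec : Claim_equal_pgn_variation := by
  intro variation turn _
  unfold Spec_pgn_variation pgn_variation pgn_variation_alt
  cases turn with
  | true =>
    simp only [if_pos, List.nil_append]
    have h := pgn_foldA_join variation 1 []
    norm_num at h
    rw [h]
    cases variation with
    | nil => simp [pgnB_loop]
    | cons w t =>
      cases t with
      | nil =>
        simp only [pgnB_loop, pgn_join_space_cons]
        simp [pgn_strip_space_cons]
      | cons b t' =>
        simp only [pgnB_loop, pgn_join_space_cons]
        simp [pgn_strip_space_cons]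
  | false =>
    cases variation with
    | nil => rfl
    | cons m t =>
      simp only [PySem.List.enumerate_cons, List.foldl_cons, pgnA_step]
      have hod : (PySem.Int.mod 1 2 == 0) = false := by decide
      simp only [hod, Bool.false_eq_true, if_false]
      have h := pgn_foldA_join t 2 (['1', '.', '.', '.'] ++ ' ' :: m.toList)
      norm_num at h
      rw [show (1 : Int) + 1 = 2 from rfl]
      simp only [List.cons_append, List.nil_append] at h ⊢
      rw [h]
      simp [pgn_join_space_cons]
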